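-- pv_equiv track=rewrite | github.com/dh7hong/algorithms-level-facebook | 175_puzzle-fill.py | solution
-- ===== SOURCE A (Python) =====
-- from collections import deque
--
-- def solution(game_board, table):
--     n = len(game_board)
--     visited = [[False]*n for _ in range(n)]
--
--     # Directions
--     dx = [1, -1, 0, 0]
--     dy = [0, 0, 1, -1]
--
--     # Extract connected components
--     def bfs(x, y, board, target):
--         q = deque([(x, y)])
--         visited[x][y] = True
--         shape = [(0, 0)]
--         origin_x, origin_y = x, y
--
--         while q:
--             cx, cy = q.popleft()
--             for i in range(4):
--                 nx, ny = cx + dx[i], cy + dy[i]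
--                 if 0 <= nx < n and 0 <= ny < n:
--                     if not visited[nx][ny] and board[nx][ny] == target:
--                         visited[nx][ny] = True
--                         q.append((nx, ny))
--                         shape.append((nx - origin_x, ny - origin_y))
--         return shape
--
--     # Rotate shape 90 degrees
--     def rotate(shape):
--         return [(y, -x) for x, y in shape]
--
--     # Normalize shape
--     def normalize(shape):
--         min_x = min(x for x, y in shape)
--         min_y = min(y for x, y in shape)
--         return sorted((x - min_x, y - min_y) for x, y in shape)
--
--     # Step 1: extract empty spaces from game_board
--     blanks = []
--     visited = [[False]*n for _ in range(n)]
--     for i in range(n):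
--         for j in range(n):
--             if game_board[i][j] == 0 and not visited[i][j]:
--                 blanks.append(normalize(bfs(i, j, game_board, 0)))
--
--     # Step 2: extract blocks from table
--     blocks = []
--     visited = [[False]*n for _ in range(n)]
--     for i in range(n):
--         for j in range(n):
--             if table[i][j] == 1 and not visited[i][j]:
--                 blocks.append(bfs(i, j, table, 1))
--
--     used = [False] * len(blocks)
--     answer = 0
--
--     # Step 3: match blanks with blocks
--     for blank in blanks:
--         for i, block in enumerate(blocks):
--             if used[i] or len(block) != len(blank):
--                 continue
--
--             cur = block
--             matched = False
--             for _ in range(4):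
--                 cur = rotate(cur)
--                 if normalize(cur) == blank:
--                     used[i] = True
--                     answer += len(blank)
--                     matched = True
--                     break
--
--             if matched:
--                 break
--
--     return answer
-- ===== SOURCE B (Python) =====
-- # B: one generic extraction pass per board (single flat loop with divmod, a set of
-- # visited cells, a head-pointer worklist), each shape canonicalized once as the
-- # lexicographically least of its four normalized rotations; both sides are bucketed
-- # in Counters and the answer is the sum over blank keys of min(count, blocks)*size.
-- from collections import Counter
--
-- def solution(game_board, table):
--     n = len(game_board)
--
--     def normalize(cells):
--         s = sorted(cells)
--         mx = s[0][0]
--         my = min(y for _, y in s)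
--         return tuple((x - mx, y - my) for x, y in s)
--
--     def canon(cells):
--         cands = []
--         cur = cells
--         for _ in range(4):
--             cur = [(y, -x) for x, y in cur]
--             cands.append(normalize(cur))
--         return min(cands)
--
--     def shapes(board, target):
--         seen = set()
--         out = []
--         for idx in range(n * n):
--             i, j = divmod(idx, n)
--             if board[i][j] == target and (i, j) not in seen:
--                 seen.add((i, j))
--                 comp = [(i, j)]
--                 head = 0
--                 while head < len(comp):
--                     x, y = comp[head]
--                     head += 1
--                     for p in ((x + 1, y), (x - 1, y), (x, y + 1), (x, y - 1)):
--                         if 0 <= p[0] < n and 0 <= p[1] < n and p not in seen and board[p[0]][p[1]] == target: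
--                             seen.add(p)
--                             comp.append(p)
--                 out.append(canon(comp))
--         return out
--
--     blanks = Counter(shapes(game_board, 0))
--     blocks = Counter(shapes(table, 1))
--     return sum(min(c, blocks[k]) * len(k) for k, c in blanks.items())
-- ===== Notes on version B (the rewrite author's own statement) =====
-- stated objective: alternative
-- what changed: A scans every unused block for every blank, re-rotating and re-normalizing per pair with a used[] array; B extracts components with one generic flat-indexed pass (set of visited cells, head-pointer worklist), canonicalizes each shape once as the lex-least of its four normalized rotations, buckets both sides in Counters and returns the sum over blank keys of min(count, block count) * size.
import Mathlib
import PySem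

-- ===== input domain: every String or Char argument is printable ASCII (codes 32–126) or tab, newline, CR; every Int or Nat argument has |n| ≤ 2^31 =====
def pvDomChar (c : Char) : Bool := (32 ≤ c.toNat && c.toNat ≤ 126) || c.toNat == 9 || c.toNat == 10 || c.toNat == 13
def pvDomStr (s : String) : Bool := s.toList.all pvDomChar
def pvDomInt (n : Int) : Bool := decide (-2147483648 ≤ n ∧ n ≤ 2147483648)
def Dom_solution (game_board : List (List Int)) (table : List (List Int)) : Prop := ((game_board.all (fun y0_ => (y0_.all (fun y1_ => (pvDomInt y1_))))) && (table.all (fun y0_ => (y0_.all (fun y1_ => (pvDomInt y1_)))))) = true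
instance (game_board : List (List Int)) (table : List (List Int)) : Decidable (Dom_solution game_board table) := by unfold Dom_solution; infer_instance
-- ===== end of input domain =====

-- B replaces A's per-blank scan over all unused blocks under all four rotations by a
-- single generic extraction pass (flat index + divmod, a set of visited cells), one
-- canonical form per shape (lex-least normalized rotation) and Counters on both sides,
-- summing min(blank count, block count) * size per key.

-- A's board[i][j] accessor
def pvGrid (b : List (List Int)) (x y : Int) : Int :=
  PySem.List.pyGetD (PySem.List.pyGetD b x []) y 0

-- ===== PORT A =====
-- A's visited matrix: read / write / all-False initialisation
def pvVis (v : List (List Bool)) (x y : Int) : Bool :=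
  PySem.List.pyGetD (PySem.List.pyGetD v x []) y false
def pvMark (v : List (List Bool)) (x y : Int) : List (List Bool) :=
  PySem.List.pySetD v x (PySem.List.pySetD (PySem.List.pyGetD v x []) y true)
def pvFalse (n : Nat) : List (List Bool) := List.replicate n (List.replicate n false)

def rotA (s : List (Int × Int)) : List (Int × Int) := s.map (fun p => (p.2, -p.1))

def normA (s : List (Int × Int)) : List (Int × Int) :=
  let mx := ((PySem.List.min? (s.map Prod.fst) (fun v => v)).getD 0)
  let my := ((PySem.List.min? (s.map Prod.snd) (fun v => v)).getD 0)
  PySem.List.sorted2 (s.map (fun p => (p.1 - mx, p.2 - my))) Prod.fst Prod.snd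

-- one iteration of "for i in range(4)" inside A's bfs
def bfsNbrA (n : Int) (board : List (List Int)) (target ox oy cx cy : Int)
    (st : List (List Bool) × List (Int × Int) × List (Int × Int)) (i : Int) :
    List (List Bool) × List (Int × Int) × List (Int × Int) :=
  let nx := cx + PySem.List.pyGetD [1, -1, 0, 0] i 0
  let ny := cy + PySem.List.pyGetD [0, 0, 1, -1] i 0
  if (0 ≤ nx ∧ nx < n) ∧ (0 ≤ ny ∧ ny < n) then
    if pvVis st.1 nx ny = false ∧ pvGrid board nx ny = target then
      (pvMark st.1 nx ny, st.2.1 ++ [(nx, ny)], st.2.2 ++ [(nx - ox, ny - oy)])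
    else st
  else st

-- A's "while q:" loop (fuel only makes the recursion structural; n*n+1 pops never run out)
def bfsLoopA (n : Int) (board : List (List Int)) (target ox oy : Int) :
    Nat → List (List Bool) → List (Int × Int) → List (Int × Int) →
    List (Int × Int) × List (List Bool)
  | 0, vis, _, shape => (shape, vis)
  | fuel + 1, vis, q, shape =>
    match q with
    | [] => (shape, vis)
    | c :: q' =>
      let st := (PySem.List.pyRange 0 4 1).foldl (bfsNbrA n board target ox oy c.1 c.2) (vis, q', shape)
      bfsLoopA n board target ox oy fuel st.1 st.2.1 st.2.2

def bfsA (n : Int) (board : List (List Int)) (target x y : Int) (vis : List (List Bool)) :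
    List (Int × Int) × List (List Bool) :=
  bfsLoopA n board target x y (n.toNat * n.toNat + 1) (pvMark vis x y) [(x, y)] [(0, 0)]

def scanBlanksA (n : Int) (board : List (List Int)) : List (List (Int × Int)) :=
  ((PySem.List.pyRange 0 n 1).foldl (fun st i =>
    (PySem.List.pyRange 0 n 1).foldl (fun (st : List (List Bool) × List (List (Int × Int))) j =>
      if pvGrid board i j = 0 ∧ pvVis st.1 i j = false then
        let r := bfsA n board 0 i j st.1
        (r.2, st.2 ++ [normA r.1])
      else st) st)
    (pvFalse n.toNat, [])).2

def scanBlocksA (n : Int) (board : List (List Int)) : List (List (Int × Int)) :=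
  ((PySem.List.pyRange 0 n 1).foldl (fun st i =>
    (PySem.List.pyRange 0 n 1).foldl (fun (st : List (List Bool) × List (List (Int × Int))) j =>
      if pvGrid board i j = 1 ∧ pvVis st.1 i j = false then
        let r := bfsA n board 1 i j st.1
        (r.2, st.2 ++ [r.1])
      else st) st)
    (pvFalse n.toNat, [])).2

-- "cur = rotate(cur); if normalize(cur) == blank: …" tried 4 times
def rotTryA (blank : List (Int × Int)) : Nat → List (Int × Int) → Bool
  | 0, _ => false
  | k + 1, cur =>
    let cur' := rotA cur
    if normA cur' = blank then true else rotTryA blank k cur'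

-- A's inner "for i, block in enumerate(blocks)" with its used[i] flags
def matchOneA (blank : List (Int × Int)) :
    List (List (Int × Int)) → List Bool → List Bool × Bool
  | [], used => (used, false)
  | _ :: _, [] => ([], false)
  | b :: bs, u :: us =>
    if u = true ∨ ¬ b.length = blank.length then
      let r := matchOneA blank bs us
      (u :: r.1, r.2)
    else if rotTryA blank 4 b then (true :: us, true)
    else
      let r := matchOneA blank bs us
      (u :: r.1, r.2)

def solution (game_board : List (List Int)) (table : List (List Int)) : Int :=
  let n : Int := game_board.length
  let blanks := scanBlanksA n game_board
  let blocks := scanBlocksA n table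
  let r := blanks.foldl (fun (st : List Bool × Int) blank =>
    let m := matchOneA blank blocks st.1
    (m.1, if m.2 then st.2 + (blank.length : Int) else st.2))
    (List.replicate blocks.length false, 0)
  r.2

-- ===== PORT B =====
-- B works on cells (Python int pairs) and shapes (tuples/lists of cells)
abbrev PtB := Int × Int
abbrev ShapeB := List PtB

-- board[p[0]][p[1]] (B reads cells through pairs)
def cellB (board : List (List Int)) (p : PtB) : Int :=
  PySem.List.pyGetD (PySem.List.pyGetD board p.1 []) p.2 0

-- hand-ported Python tuple/list "<" (exact lexicographic comparison of int pairs / their lists)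
def pairLtB (a b : PtB) : Bool := a.1 < b.1 || (a.1 == b.1 && a.2 < b.2)
def listLtB : ShapeB → ShapeB → Bool
  | [], [] => false
  | [], _ :: _ => true
  | _ :: _, [] => false
  | a :: s, b :: t => if pairLtB a b then true else if pairLtB b a then false else listLtB s t

-- one step of Python's min() fold (keeps the FIRST minimum)
def pvMin2 (a b : ShapeB) : ShapeB := if listLtB b a then b else a

-- "s = sorted(cells); mx = s[0][0]; my = min(...); tuple((x-mx, y-my) ...)"
-- (s[0] is only read on nonempty components; pyGetD's default is never used)
def normB (cells : ShapeB) : ShapeB :=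
  let s := PySem.List.sorted2 cells Prod.fst Prod.snd
  let mx := (PySem.List.pyGetD s 0 ((0 : Int), (0 : Int))).1
  let my := ((PySem.List.min? (s.map Prod.snd) (fun v => v)).getD 0)
  s.map (fun p => (p.1 - mx, p.2 - my))

-- "cands = []; for _ in range(4): cur = [(y, -x) ...]; cands.append(normalize(cur)); return min(cands)"
def canonB (cells : ShapeB) : ShapeB :=
  let st := (PySem.List.pyRange 0 4 1).foldl
    (fun (st : ShapeB × List ShapeB) _ =>
      let c := st.1.map (fun p => (p.2, -p.1))
      (c, st.2 ++ [normB c])) (cells, [])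
  match st.2 with
  | [] => []            -- unreachable: range(4) yields four candidates
  | x :: xs => xs.foldl pvMin2 x   -- Python min() over the candidates

-- one neighbour test of B's worklist flood fill (seen is a Python set of cells)
def nbrB (n : Int) (board : List (List Int)) (target : Int)
    (st : PySem.Set PtB × ShapeB) (p : PtB) : PySem.Set PtB × ShapeB :=
  if (0 ≤ p.1 ∧ p.1 < n) ∧ (0 ≤ p.2 ∧ p.2 < n) then
    if PySem.Set.contains st.1 p = false ∧ cellB board p = target then
      (PySem.Set.add st.1 p, st.2 ++ [p])
    else st
  else st

-- B's "while head < len(comp):" (fuel only makes the recursion structural; n*n+1 steps never run out)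
def floodB (n : Int) (board : List (List Int)) (target : Int) :
    Nat → PySem.Set PtB → ShapeB → Nat → ShapeB × PySem.Set PtB
  | 0, seen, comp, _ => (comp, seen)
  | fuel + 1, seen, comp, h =>
    if h < comp.length then
      let c := comp.getD h (0, 0)
      let st := [(c.1 + 1, c.2), (c.1 - 1, c.2), (c.1, c.2 + 1), (c.1, c.2 - 1)].foldl
        (nbrB n board target) (seen, comp)
      floodB n board target fuel st.1 st.2 (h + 1)
    else (comp, seen)

-- "for idx in range(n*n): i, j = divmod(idx, n)" (n > 0 whenever the range is nonempty)
def shapesB (n : Int) (board : List (List Int)) (target : Int) : List ShapeB :=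
  ((PySem.List.pyRange 0 (n * n) 1).foldl
    (fun (st : PySem.Set PtB × List ShapeB) idx =>
      let i := PySem.Int.floordiv idx n
      let j := PySem.Int.mod idx n
      if cellB board (i, j) = target ∧ PySem.Set.contains st.1 (i, j) = false then
        let r := floodB n board target (n.toNat * n.toNat + 1) (PySem.Set.add st.1 (i, j)) [(i, j)] 0
        (r.2, st.2 ++ [canonB r.1])
      else st)
    (PySem.Set.empty, [])).2

def solution_alt (game_board : List (List Int)) (table : List (List Int)) : Int :=
  let n : Int := game_board.length
  let blanks := PySem.Dict.counter (shapesB n game_board 0)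
  let blocks := PySem.Dict.counter (shapesB n table 1)
  blanks.items.foldl (fun (acc : Int) kc => acc + min kc.2 (blocks.getD kc.1 0) * (kc.1.length : Int)) 0

-- ===== PRECONDITION & SPEC =====
-- Pre_ excludes exactly the inputs where Python A raises IndexError: with n = len(game_board),
-- A indexes game_board[i][j] and table[i][j] for all i, j < n.
def Pre_solution (game_board : List (List Int)) (table : List (List Int)) : Prop :=
  (∀ r ∈ game_board, game_board.length ≤ r.length) ∧
  game_board.length ≤ table.length ∧
  (∀ r ∈ table.take game_board.length, game_board.length ≤ r.length)
instance (game_board : List (List Int)) (table : List (List Int)) : Decidable (Pre_solution game_board table) := by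
  unfold Pre_solution; infer_instance

def pvWitness_solution : List (List Int) × List (List Int) := ([[0, 1], [1, 1]], [[1, 0], [0, 0]])

def Spec_solution (game_board : List (List Int)) (table : List (List Int)) (out : Int) : Prop := out = solution_alt game_board table
instance (game_board : List (List Int)) (table : List (List Int)) (out : Int) : Decidable (Spec_solution game_board table out) := by unfold Spec_solution; infer_instance

-- ===== CLAIM (what is proved, stated in full; the proofs are below) =====
def Claim_equal_solution : Prop := ∀ (game_board : List (List Int)) (table : List (List Int)), Dom_solution game_board table → Pre_solution game_board table → Spec_solution game_board table (solution game_board table)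

-- ===== LEMMAS AND PROOFS =====

theorem pairLtB_trans {a b c : Int × Int} (h1 : pairLtB a b = true) (h2 : pairLtB b c = true) :
    pairLtB a c = true := by
  simp [pairLtB] at *; omega

theorem pairLtB_conn {a b : Int × Int} (h1 : pairLtB a b = false) (h2 : pairLtB b a = false) :
    a = b := by
  simp [pairLtB] at *
  obtain ⟨a1, a2⟩ := a; obtain ⟨b1, b2⟩ := b
  simp_all; omega

theorem pairLtB_irrefl (a : Int × Int) : pairLtB a a = false := by simp [pairLtB]

theorem listLtB_conn : ∀ {s t : List (Int × Int)}, listLtB s t = false → listLtB t s = false → s = t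
  | [], [], _, _ => rfl
  | [], _ :: _, h1, _ => by simp [listLtB] at h1
  | _ :: _, [], _, h2 => by simp [listLtB] at h2
  | a :: s, b :: t, h1, h2 => by
    simp only [listLtB] at h1 h2
    by_cases hab : pairLtB a b = true
    · simp [hab] at h1
    · by_cases hba : pairLtB b a = true
      · simp [hba] at h2
      · simp only [Bool.not_eq_true] at hab hba
        simp [hab, hba] at h1 h2
        have := pairLtB_conn hab hba
        rw [this, listLtB_conn h1 h2]

theorem listLtB_trans : ∀ {s t u : List (Int × Int)}, listLtB s t = true → listLtB t u = true → listLtB s u = true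
  | [], _ :: _, [], _, h2 => by simp [listLtB] at h2
  | [], _ :: _, _ :: _, _, _ => by simp [listLtB]
  | a :: s, b :: t, c :: u, h1, h2 => by
    simp only [listLtB] at h1 h2 ⊢
    by_cases hab : pairLtB a b = true
    · by_cases hbc : pairLtB b c = true
      · simp [pairLtB_trans hab hbc]
      · by_cases hcb : pairLtB c b = true
        · simp [hbc, hcb] at h2
        · simp only [Bool.not_eq_true] at hbc hcb
          rw [pairLtB_conn hbc hcb] at hab
          simp [hab]
    · by_cases hba : pairLtB b a = true
      · simp [hab, hba] at h1
      · simp only [Bool.not_eq_true] at hab hba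
        rw [← pairLtB_conn hab hba] at h2
        simp [hab, hba] at h1 ⊢
        by_cases hac : pairLtB a c = true
        · simp [hac]
        · by_cases hca : pairLtB c a = true
          · simp [hac, hca] at h2
          · simp only [Bool.not_eq_true] at hac hca
            simp [hac, hca] at h2 ⊢
            exact listLtB_trans h1 h2

theorem listLtB_irrefl : ∀ (s : List (Int × Int)), listLtB s s = false
  | [] => rfl
  | a :: s => by simp [listLtB, pairLtB_irrefl, listLtB_irrefl s]

theorem listLtB_asymm {s t : List (Int × Int)} (h : listLtB s t = true) : listLtB t s = false := by
  by_contra hc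
  simp only [Bool.not_eq_false] at hc
  have := listLtB_trans h hc
  simp [listLtB_irrefl] at this

theorem listLtB_le_trans {s t u : List (Int × Int)} (h1 : listLtB t s = false)
    (h2 : listLtB u t = false) : listLtB u s = false := by
  by_contra hc
  simp only [Bool.not_eq_false] at hc
  by_cases hst : listLtB s t = true
  · have := listLtB_trans hc hst
    simp [this] at h2
  · simp only [Bool.not_eq_true] at hst
    rw [listLtB_conn hst h1] at hc
    simp [hc] at h2

theorem pairLtB_asymm {a b : Int × Int} (h : pairLtB a b = true) : pairLtB b a = false := by
  simp [pairLtB] at *; omega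

theorem pvSorted2_eq_foldl (xs : List (Int × Int)) :
    PySem.List.sorted2 xs Prod.fst Prod.snd = xs.foldl (fun acc x => PySem.List.insertBy pairLtB x acc) [] := by
  show List.foldl _ [] xs = _
  congr 1
  funext acc x
  congr 1
  funext a b
  rcases lt_trichotomy a.1 b.1 with h | h | h
  · simp [pairLtB, h]
  · simp [pairLtB, h]
  · simp [pairLtB, h, not_lt_of_gt h]
    omega

theorem insertBy_pairwise (x : Int × Int) : ∀ (ys : List (Int × Int)),
    ys.Pairwise (fun a b => pairLtB b a = false) →
    (PySem.List.insertBy pairLtB x ys).Pairwise (fun a b => pairLtB b a = false)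
  | [], _ => by simp [PySem.List.insertBy]
  | y :: ys, h => by
    rw [List.pairwise_cons] at h
    obtain ⟨hy, hys⟩ := h
    show (if pairLtB x y = true then x :: y :: ys else y :: PySem.List.insertBy pairLtB x ys).Pairwise _
    by_cases hxy : pairLtB x y = true
    · simp only [hxy, if_true]
      refine List.Pairwise.cons ?_ (List.Pairwise.cons hy hys)
      intro z hz
      rcases List.mem_cons.mp hz with rfl | hz
      · exact pairLtB_asymm hxy
      · by_contra hc
        simp only [Bool.not_eq_false] at hc
        have := pairLtB_trans hc hxy
        simp [hy z hz] at this
    · simp only [hxy, if_false]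
      refine List.Pairwise.cons ?_ (insertBy_pairwise x ys hys)
      intro z hz
      rw [PySem.List.mem_insertBy] at hz
      rcases hz with rfl | hz
      · simpa using hxy
      · exact hy z hz

theorem sorted2_pairwise' (xs : List (Int × Int)) :
    (PySem.List.sorted2 xs Prod.fst Prod.snd).Pairwise (fun a b => pairLtB b a = false) := by
  rw [pvSorted2_eq_foldl]
  have : ∀ (l acc : List (Int × Int)), acc.Pairwise (fun a b => pairLtB b a = false) →
      (l.foldl (fun acc x => PySem.List.insertBy pairLtB x acc) acc).Pairwise (fun a b => pairLtB b a = false) := by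
    intro l
    induction l with
    | nil => intro acc h; exact h
    | cons x l ih => intro acc h; exact ih _ (insertBy_pairwise x acc h)
  exact this xs [] (by simp)

theorem sorted2_eq_of_perm {s t : List (Int × Int)} (h : s.Perm t) :
    PySem.List.sorted2 s Prod.fst Prod.snd = PySem.List.sorted2 t Prod.fst Prod.snd := by
  apply List.eq_of_perm_of_sorted (le := fun a b => pairLtB b a = false)
  · intro a b _ _ h1 h2
    exact (pairLtB_conn h2 h1)
  · exact sorted2_pairwise' s
  · exact sorted2_pairwise' t
  · exact ((PySem.List.sorted2_perm s _ _ _).trans h).trans (PySem.List.sorted2_perm t _ _ _).symm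

theorem pvMinVal {l : List Int} {m m' : Int}
    (hm : PySem.List.min? l (fun v => v) = some m) (h1 : m' ∈ l) (h2 : ∀ y ∈ l, m' ≤ y) : m = m' :=
  le_antisymm (PySem.List.min?_isMin hm m' h1) (h2 m (PySem.List.min?_mem hm))

theorem min?_id_perm {l l' : List Int} (h : l.Perm l') :
    PySem.List.min? l (fun v => v) = PySem.List.min? l' (fun v => v) := by
  cases hl : PySem.List.min? l (fun v => v) with
  | none =>
    rw [PySem.List.min?_eq_none_iff] at hl
    subst hl
    rw [List.nil_perm] at h
    subst h
    rfl
  | some m =>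
    cases hl' : PySem.List.min? l' (fun v => v) with
    | none =>
      rw [PySem.List.min?_eq_none_iff] at hl'
      subst hl'
      rw [List.perm_nil] at h
      subst h
      simp [PySem.List.min?] at hl
    | some m' =>
      have h1 : m' ∈ l := h.mem_iff.mpr (PySem.List.min?_mem hl')
      have h2 : ∀ y ∈ l, m' ≤ y := fun y hy => PySem.List.min?_isMin hl' y (h.mem_iff.mp hy)
      rw [pvMinVal hl h1 h2]

theorem min?_id_map_sub (l : List Int) (t : Int) :
    PySem.List.min? (l.map (fun v => v - t)) (fun v => v) =
      (PySem.List.min? l (fun v => v)).map (fun v => v - t) := by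
  cases hl : PySem.List.min? l (fun v => v) with
  | none =>
    rw [PySem.List.min?_eq_none_iff] at hl
    subst hl
    rfl
  | some m =>
    cases hl' : PySem.List.min? (l.map (fun v => v - t)) (fun v => v) with
    | none =>
      rw [PySem.List.min?_eq_none_iff, List.map_eq_nil_iff] at hl'
      subst hl'
      simp [PySem.List.min?] at hl
    | some m' =>
      have h1 : m - t ∈ l.map (fun v => v - t) := List.mem_map_of_mem (PySem.List.min?_mem hl)
      have h2 : ∀ y ∈ l.map (fun v => v - t), m - t ≤ y := by
        intro y hy
        obtain ⟨z, hz, rfl⟩ := List.mem_map.mp hy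
        have := PySem.List.min?_isMin hl z hz
        omega
      simp [pvMinVal hl' h1 h2]

theorem normA_perm {s t : List (Int × Int)} (h : s.Perm t) : normA s = normA t := by
  unfold normA
  rw [min?_id_perm (h.map Prod.fst), min?_id_perm (h.map Prod.snd)]
  exact sorted2_eq_of_perm (h.map _)

theorem normA_translate (s : List (Int × Int)) (tx ty : Int) :
    normA (s.map (fun p => (p.1 - tx, p.2 - ty))) = normA s := by
  cases s with
  | nil => rfl
  | cons a s0 =>
    unfold normA
    have hfst : (((a :: s0).map (fun p => (p.1 - tx, p.2 - ty))).map Prod.fst) =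
        ((a :: s0).map Prod.fst).map (fun v => v - tx) := by
      simp [List.map_map, Function.comp_def]
    have hsnd : (((a :: s0).map (fun p => (p.1 - tx, p.2 - ty))).map Prod.snd) =
        ((a :: s0).map Prod.snd).map (fun v => v - ty) := by
      simp [List.map_map, Function.comp_def]
    rw [hfst, hsnd, min?_id_map_sub, min?_id_map_sub]
    cases hm : PySem.List.min? ((a :: s0).map Prod.fst) (fun v => v) with
    | none => rw [PySem.List.min?_eq_none_iff] at hm; simp at hm
    | some mx =>
      cases hm' : PySem.List.min? ((a :: s0).map Prod.snd) (fun v => v) with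
      | none => rw [PySem.List.min?_eq_none_iff] at hm'; simp at hm'
      | some my =>
        simp only [Option.map_some, Option.getD_some, List.map_map]
        congr 1
        apply List.map_congr_left
        intro p _
        simp [Function.comp_def]

theorem rotA_translate (s : List (Int × Int)) (a b : Int) :
    rotA (s.map (fun p => (p.1 - a, p.2 - b))) = (rotA s).map (fun p => (p.1 - b, p.2 - (-a))) := by
  simp only [rotA, List.map_map]
  apply List.map_congr_left
  intro p _
  simp [Function.comp_def]
  ring

theorem normA_sub_perm (s : List (Int × Int)) :
    ∃ tx ty, (s.map (fun p => (p.1 - tx, p.2 - ty))).Perm (normA s) := by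
  unfold normA
  exact ⟨_, _, (PySem.List.sorted2_perm _ _ _ _).symm⟩

theorem normA_rot_congr {s t : List (Int × Int)} (h : normA s = normA t) :
    normA (rotA s) = normA (rotA t) := by
  obtain ⟨xs, ys, hs⟩ := normA_sub_perm s
  obtain ⟨xt, yt, ht⟩ := normA_sub_perm t
  have hper : (s.map (fun p => (p.1 - xs, p.2 - ys))).Perm (t.map (fun p => (p.1 - xt, p.2 - yt))) :=
    (hs.trans (h ▸ ht.symm))
  have key : normA (rotA (s.map (fun p => (p.1 - xs, p.2 - ys)))) =
      normA (rotA (t.map (fun p => (p.1 - xt, p.2 - yt)))) :=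
    normA_perm (hper.map (fun p : Int × Int => (p.2, -p.1)))
  have eS : normA (rotA (s.map (fun p => (p.1 - xs, p.2 - ys)))) = normA (rotA s) := by
    rw [rotA_translate, normA_translate]
  have eT : normA (rotA (t.map (fun p => (p.1 - xt, p.2 - yt)))) = normA (rotA t) := by
    rw [rotA_translate, normA_translate]
  exact eS.symm.trans (key.trans eT)

theorem normA_idem (s : List (Int × Int)) : normA (normA s) = normA s := by
  obtain ⟨tx, ty, hs⟩ := normA_sub_perm s
  calc normA (normA s) = normA (s.map (fun p => (p.1 - tx, p.2 - ty))) := normA_perm hs.symm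
    _ = normA s := normA_translate s tx ty

theorem normA_length (s : List (Int × Int)) : (normA s).length = s.length := by
  obtain ⟨tx, ty, hs⟩ := normA_sub_perm s
  rw [← hs.length_eq, List.length_map]

theorem rotA_length (s : List (Int × Int)) : (rotA s).length = s.length := List.length_map ..

theorem rotA_rotA_rotA_rotA (s : List (Int × Int)) : rotA (rotA (rotA (rotA s))) = s := by
  simp [rotA, List.map_map, Function.comp_def]

def pvV (s : List (Int × Int)) : List (List (Int × Int)) :=
  [normA (rotA s), normA (rotA (rotA s)), normA (rotA (rotA (rotA s))), normA (rotA (rotA (rotA (rotA s))))]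

def pvMin4 (l : List (List (Int × Int))) : List (Int × Int) :=
  match l with
  | [a, b, c, d] => pvMin2 (pvMin2 (pvMin2 a b) c) d
  | _ => []

theorem pairLtB_sub (mx my : Int) (a b : Int × Int) :
    pairLtB (a.1 - mx, a.2 - my) (b.1 - mx, b.2 - my) = pairLtB a b := by
  rw [Bool.eq_iff_iff]
  simp only [pairLtB, Bool.or_eq_true, Bool.and_eq_true, decide_eq_true_eq, beq_iff_eq]
  omega

theorem sorted2_head_fst_min {c : Int × Int} {cells : List (Int × Int)}
    (hc : c ∈ PySem.List.sorted2 cells Prod.fst Prod.snd) :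
    (PySem.List.pyGetD (PySem.List.sorted2 cells Prod.fst Prod.snd) 0 ((0 : Int), (0 : Int))).1 ≤ c.1 := by
  cases hs : PySem.List.sorted2 cells Prod.fst Prod.snd with
  | nil => rw [hs] at hc; simp at hc
  | cons s0 rest =>
    rw [PySem.List.pyGetD_zero_cons]
    rw [hs] at hc
    rcases List.mem_cons.mp hc with rfl | hmem
    · exact le_refl _
    · have hp := sorted2_pairwise' cells
      rw [hs, List.pairwise_cons] at hp
      have := hp.1 c hmem
      simp [pairLtB] at this
      omega

theorem normB_eq_normA (cells : List (Int × Int)) : normB cells = normA cells := by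
  cases cells with
  | nil => rfl
  | cons c0 cs =>
    unfold normB normA
    dsimp only
    have hperm : (PySem.List.sorted2 (c0 :: cs) Prod.fst Prod.snd).Perm (c0 :: cs) :=
      PySem.List.sorted2_perm _ _ _ _
    have hne : PySem.List.sorted2 (c0 :: cs) Prod.fst Prod.snd ≠ [] := by
      intro h
      have := hperm.length_eq
      rw [h] at this
      simp at this
    -- the two translation offsets agree
    have hmy : PySem.List.min? ((PySem.List.sorted2 (c0 :: cs) Prod.fst Prod.snd).map Prod.snd) (fun v => v)
        = PySem.List.min? ((c0 :: cs).map Prod.snd) (fun v => v) :=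
      min?_id_perm (hperm.map Prod.snd)
    have hmx : ∀ m, PySem.List.min? ((c0 :: cs).map Prod.fst) (fun v => v) = some m →
        (PySem.List.pyGetD (PySem.List.sorted2 (c0 :: cs) Prod.fst Prod.snd) 0 ((0 : Int), (0 : Int))).1 = m := by
      intro m hm
      have hhead : (PySem.List.pyGetD (PySem.List.sorted2 (c0 :: cs) Prod.fst Prod.snd) 0 ((0 : Int), (0 : Int))) ∈
          PySem.List.sorted2 (c0 :: cs) Prod.fst Prod.snd := by
        cases hs : PySem.List.sorted2 (c0 :: cs) Prod.fst Prod.snd with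
        | nil => exact absurd hs hne
        | cons s0 rest => rw [PySem.List.pyGetD_zero_cons]; exact List.mem_cons_self
      have h1 : (PySem.List.pyGetD (PySem.List.sorted2 (c0 :: cs) Prod.fst Prod.snd) 0 ((0 : Int), (0 : Int))).1
          ∈ (c0 :: cs).map Prod.fst :=
        List.mem_map_of_mem (hperm.mem_iff.mp hhead)
      have h2 : ∀ y ∈ (c0 :: cs).map Prod.fst,
          (PySem.List.pyGetD (PySem.List.sorted2 (c0 :: cs) Prod.fst Prod.snd) 0 ((0 : Int), (0 : Int))).1 ≤ y := by
        intro y hy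
        obtain ⟨p, hp, rfl⟩ := List.mem_map.mp hy
        exact sorted2_head_fst_min (hperm.mem_iff.mpr hp)
      exact (pvMinVal hm h1 h2).symm
    cases hm : PySem.List.min? ((c0 :: cs).map Prod.fst) (fun v => v) with
    | none => rw [PySem.List.min?_eq_none_iff] at hm; simp at hm
    | some m =>
      rw [hmy, hmx m hm]
      simp only [Option.getD_some]
      -- map of a translation over the sorted list = sorted list of the mapped translation
      set my := (PySem.List.min? ((c0 :: cs).map Prod.snd) (fun v => v)).getD 0 with hmydef
      apply List.Perm.eq_of_pairwise (le := fun a b => pairLtB b a = false)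
      · intro a b _ _ h1 h2
        exact pairLtB_conn h2 h1
      · have hp := sorted2_pairwise' (c0 :: cs)
        refine List.Pairwise.map _ ?_ hp
        intro a b hab
        rw [pairLtB_sub m my b a]
        exact hab
      · exact sorted2_pairwise' _
      · exact (hperm.map _).trans
          (PySem.List.sorted2_perm (List.map (fun p => (p.1 - m, p.2 - my)) (c0 :: cs)) _ _ _).symm

theorem canonB_eq (s : List (Int × Int)) : canonB s = pvMin4 (pvV s) := by
  have h4 : PySem.List.pyRange 0 4 1 = [0, 1, 2, 3] := by decide
  simp only [canonB, h4, List.foldl, pvMin4, pvV, normB_eq_normA]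
  rfl

theorem pvMin2_mem (a b : List (Int × Int)) : pvMin2 a b = a ∨ pvMin2 a b = b := by
  unfold pvMin2; split_ifs <;> simp

theorem pvMin2_le_left (a b : List (Int × Int)) : listLtB a (pvMin2 a b) = false := by
  unfold pvMin2
  by_cases h : listLtB b a = true
  · simp [h, listLtB_asymm h]
  · simp only [Bool.not_eq_true] at h
    simp [h, listLtB_irrefl]

theorem pvMin2_le_right (a b : List (Int × Int)) : listLtB b (pvMin2 a b) = false := by
  unfold pvMin2
  by_cases h : listLtB b a = true
  · simp [h, listLtB_irrefl]
  · simp only [Bool.not_eq_true] at h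
    simp [h]

theorem pvMin4_mem (a b c d : List (Int × Int)) : pvMin4 [a, b, c, d] ∈ [a, b, c, d] := by
  show pvMin2 (pvMin2 (pvMin2 a b) c) d ∈ _
  rcases pvMin2_mem (pvMin2 (pvMin2 a b) c) d with h | h <;> rw [h]
  · rcases pvMin2_mem (pvMin2 a b) c with h2 | h2 <;> rw [h2]
    · rcases pvMin2_mem a b with h3 | h3 <;> rw [h3] <;> simp
    · simp
  · simp

theorem pvMin4_lb (a b c d : List (Int × Int)) :
    ∀ y ∈ [a, b, c, d], listLtB y (pvMin4 [a, b, c, d]) = false := by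
  have hm12 := pvMin2_le_left a b
  have hm12' := pvMin2_le_right a b
  have hm123 := pvMin2_le_left (pvMin2 a b) c
  have hm123' := pvMin2_le_right (pvMin2 a b) c
  have hm := pvMin2_le_left (pvMin2 (pvMin2 a b) c) d
  have hm' := pvMin2_le_right (pvMin2 (pvMin2 a b) c) d
  intro y hy
  have h12m : listLtB (pvMin2 a b) (pvMin4 [a,b,c,d]) = false := listLtB_le_trans hm hm123
  simp only [List.mem_cons, List.not_mem_nil, or_false] at hy
  rcases hy with rfl | rfl | rfl | rfl
  · exact listLtB_le_trans h12m hm12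
  · exact listLtB_le_trans h12m hm12'
  · exact listLtB_le_trans hm hm123'
  · exact hm'

theorem pvMin4_eq_of_mem_iff {l1 l2 : List (List (Int × Int))}
    (h1 : ∃ a b c d, l1 = [a, b, c, d]) (h2 : ∃ a b c d, l2 = [a, b, c, d])
    (h : ∀ x, x ∈ l1 ↔ x ∈ l2) : pvMin4 l1 = pvMin4 l2 := by
  obtain ⟨a1, b1, c1, d1, rfl⟩ := h1
  obtain ⟨a2, b2, c2, d2, rfl⟩ := h2
  have m1 := pvMin4_mem a1 b1 c1 d1
  have m2 := pvMin4_mem a2 b2 c2 d2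
  have le1 := pvMin4_lb a2 b2 c2 d2 _ ((h _).mp m1)
  have le2 := pvMin4_lb a1 b1 c1 d1 _ ((h _).mpr m2)
  exact listLtB_conn le1 le2

theorem pvV_of_mem {s v : List (Int × Int)} (hv : v ∈ pvV s) : ∀ x, x ∈ pvV v ↔ x ∈ pvV s := by
  have hsq : ∀ (u : List (Int × Int)), normA (rotA (rotA (rotA (rotA u)))) = normA u := by
    intro u; rw [rotA_rotA_rotA_rotA]
  simp only [pvV, List.mem_cons, List.not_mem_nil, or_false] at hv
  have base : normA v = v ∧ (∃ k : List (Int × Int), v = normA k) := by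
    rcases hv with rfl | rfl | rfl | rfl <;> exact ⟨normA_idem _, _, rfl⟩
  obtain ⟨hids, _⟩ := base
  rcases hv with rfl | rfl | rfl | rfl <;>
  · intro x
    simp only [pvV, List.mem_cons, List.not_mem_nil, or_false]
    have c1 := normA_rot_congr hids
    have c2 := normA_rot_congr c1
    have c3 := normA_rot_congr c2
    have c4 := normA_rot_congr c3
    rw [c1, c2, c3, c4]
    simp only [hsq, rotA_rotA_rotA_rotA]
    try tauto

theorem canonB_mem (s : List (Int × Int)) : canonB s ∈ pvV s := by
  rw [canonB_eq]; exact pvMin4_mem _ _ _ _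

theorem canonB_of_mem {s v : List (Int × Int)} (hv : v ∈ pvV s) : canonB v = canonB s := by
  rw [canonB_eq, canonB_eq]
  exact pvMin4_eq_of_mem_iff ⟨_, _, _, _, rfl⟩ ⟨_, _, _, _, rfl⟩ (pvV_of_mem hv)

theorem normA_mem_pvV (s : List (Int × Int)) : normA s ∈ pvV s := by
  have : normA (rotA (rotA (rotA (rotA s)))) = normA s := by rw [rotA_rotA_rotA_rotA]
  simp only [pvV, List.mem_cons]
  tauto

theorem canonB_normA (s : List (Int × Int)) : canonB (normA s) = canonB s :=
  canonB_of_mem (normA_mem_pvV s)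

theorem canonB_translate (s : List (Int × Int)) (tx ty : Int) :
    canonB (s.map (fun p => (p.1 - tx, p.2 - ty))) = canonB s := by
  rw [canonB_eq, canonB_eq]
  simp only [pvV, rotA_translate, normA_translate]

theorem canonB_length (s : List (Int × Int)) : (canonB s).length = s.length := by
  have h := canonB_mem s
  simp only [pvV, List.mem_cons, List.not_mem_nil, or_false] at h
  rcases h with h | h | h | h <;> rw [h, normA_length] <;> simp [rotA_length]

theorem rotTryA_iff (blank b : List (Int × Int)) :
    rotTryA blank 4 b = true ↔ blank ∈ pvV b := by
  simp only [pvV, List.mem_cons, List.not_mem_nil, or_false]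
  show rotTryA blank (3+1) b = true ↔ _
  rw [rotTryA]
  show (if _ then _ else rotTryA blank (2+1) _) = true ↔ _
  rw [rotTryA]
  show (if _ then _ else if _ then _ else rotTryA blank (1+1) _) = true ↔ _
  rw [rotTryA]
  show (if _ then _ else if _ then _ else if _ then _ else rotTryA blank (0+1) _) = true ↔ _
  rw [rotTryA]
  simp only [rotTryA]
  split_ifs with h1 h2 h3 h4 <;> simp_all <;> tauto

theorem matchCond_iff {blank b : List (Int × Int)} (hb : ∃ s0, blank = normA s0) :
    (b.length = blank.length ∧ rotTryA blank 4 b = true) ↔ canonB b = canonB blank := by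
  obtain ⟨s0, rfl⟩ := hb
  constructor
  · rintro ⟨-, ht⟩
    exact (canonB_of_mem ((rotTryA_iff _ _).mp ht)).symm
  · intro hc
    have hbl : normA s0 ∈ pvV (normA s0) := by
      have h1 : normA (normA s0) = normA s0 := normA_idem s0
      have : normA (rotA (rotA (rotA (rotA (normA s0))))) = normA s0 := by
        rw [rotA_rotA_rotA_rotA, h1]
      simp only [pvV, List.mem_cons]
      tauto
    have hm1 : canonB b ∈ pvV b := canonB_mem b
    have hm2 : canonB b ∈ pvV (normA s0) := hc ▸ canonB_mem (normA s0)
    have hmem : normA s0 ∈ pvV b := by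
      have e1 := pvV_of_mem hm2
      have e2 := pvV_of_mem hm1
      exact (e2 _).mp ((e1 _).mpr hbl)
    refine ⟨?_, (rotTryA_iff _ _).mpr hmem⟩
    simp only [pvV, List.mem_cons, List.not_mem_nil, or_false] at hmem
    rcases hmem with h | h | h | h <;>
      rw [h, normA_length] <;> simp [rotA_length]

-- ===== the flood-fill lockstep =====

def relOf (ox oy : Int) (p : Int × Int) : Int × Int := (p.1 - ox, p.2 - oy)

def pvShape (n : Nat) (v : List (List Bool)) : Prop := v.length = n ∧ ∀ r ∈ v, r.length = n

theorem cellB_eq (board : List (List Int)) (x y : Int) :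
    cellB board (x, y) = pvGrid board x y := rfl

def pvVisRel (n : Int) (v : List (List Bool)) (S : PySem.Set (Int × Int)) : Prop :=
  ∀ x y : Int, 0 ≤ x → x < n → 0 ≤ y → y < n → pvVis v x y = PySem.Set.contains S (x, y)

theorem pyGetD_cases {α : Type} (xs : List α) (i : Int) (d : α) :
    PySem.List.pyGetD xs i d = d ∨ PySem.List.pyGetD xs i d ∈ xs := by
  by_cases h : PySem.Raise.InRange xs.length i
  · exact Or.inr (PySem.List.pyGetD_mem xs d h)
  · left
    have : PySem.List.pyGet? xs i = none := (PySem.List.pyGet?_eq_none_iff xs i).mpr h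
    show (PySem.List.pyGet? xs i).getD d = d
    rw [this]; rfl

theorem pvVis_false (n : Nat) (x y : Int) : pvVis (pvFalse n) x y = false := by
  unfold pvVis pvFalse
  rcases pyGetD_cases (List.replicate n (List.replicate n false)) x [] with h | h
  · rw [h]
    rcases pyGetD_cases ([] : List Bool) y false with h2 | h2
    · exact h2
    · simp at h2
  · rw [List.eq_of_mem_replicate h]
    rcases pyGetD_cases (List.replicate n false) y false with h2 | h2
    · exact h2
    · exact List.eq_of_mem_replicate h2

theorem pvShape_false (n : Nat) : pvShape n (pvFalse n) :=
  ⟨List.length_replicate, fun r hr => by rw [List.eq_of_mem_replicate hr]; exact List.length_replicate⟩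

theorem contains_add_eq (S : PySem.Set (Int × Int)) (p q : Int × Int) :
    PySem.Set.contains (PySem.Set.add S p) q =
      (PySem.Set.contains S q || decide (q = p)) := by
  have h1 := PySem.Set.contains_iff (PySem.Set.add S p) q
  have h2 := PySem.Set.contains_iff S q
  rw [PySem.Set.mem_add] at h1
  cases hb : PySem.Set.contains S q <;> cases hd : decide (q = p) <;>
    cases hc : PySem.Set.contains (PySem.Set.add S p) q <;> simp_all

theorem pvShape_mark {n : Nat} {v : List (List Bool)} (hs : pvShape n v) {a b : Int}
    (ha : 0 ≤ a) (ha2 : a.toNat < n) : pvShape n (pvMark v a b) := by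
  obtain ⟨hl, hr⟩ := hs
  unfold pvMark
  constructor
  · rw [PySem.List.length_pySetD, hl]
  · intro r hrm
    rw [PySem.List.pySetD_of_nonneg _ _ ha] at hrm
    rcases List.mem_or_eq_of_mem_set hrm with h | h
    · exact hr r h
    · subst h
      rw [PySem.List.length_pySetD]
      have : PySem.List.pyGetD v a [] = v[a.toNat] :=
        PySem.List.pyGetD_eq_getElem v [] ha (by omega)
      rw [this]
      exact hr _ (List.getElem_mem _)

theorem pvVis_mark {n : Nat} {v : List (List Bool)} (hs : pvShape n v) {a b : Int}
    (ha : 0 ≤ a) (ha2 : a.toNat < n) (hb : 0 ≤ b) (hb2 : b.toNat < n)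
    (x y : Int) (hx : 0 ≤ x) (hx2 : x.toNat < n) (hy : 0 ≤ y) (hy2 : y.toNat < n) :
    pvVis (pvMark v a b) x y = if x = a ∧ y = b then true else pvVis v x y := by
  obtain ⟨hl, hr⟩ := hs
  have hrowa : PySem.List.pyGetD v a [] = v[a.toNat]'(by omega) :=
    PySem.List.pyGetD_eq_getElem v [] ha (by omega)
  have hrowlen : (v[a.toNat]'(by omega)).length = n := hr _ (List.getElem_mem _)
  unfold pvMark pvVis
  rw [PySem.List.pySetD_of_nonneg _ _ ha, hrowa, PySem.List.pySetD_of_nonneg _ _ hb]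
  have houter : PySem.List.pyGetD (v.set a.toNat ((v[a.toNat]'(by omega)).set b.toNat true)) x []
      = (v.set a.toNat ((v[a.toNat]'(by omega)).set b.toNat true))[x.toNat]'(by simp; omega) :=
    PySem.List.pyGetD_eq_getElem _ [] hx (by simp; omega)
  rw [houter, List.getElem_set]
  by_cases hxa : a.toNat = x.toNat
  · have hxa' : x = a := by omega
    rw [if_pos hxa]
    have hinner : PySem.List.pyGetD ((v[a.toNat]'(by omega)).set b.toNat true) y false
        = ((v[a.toNat]'(by omega)).set b.toNat true)[y.toNat]'(by simp [hrowlen]; omega) :=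
      PySem.List.pyGetD_eq_getElem _ false hy (by simp [hrowlen]; omega)
    rw [hinner, List.getElem_set]
    by_cases hyb : b.toNat = y.toNat
    · have : y = b := by omega
      simp [hxa', this]
    · have hyb' : ¬ y = b := by omega
      rw [if_neg hyb, if_neg (by tauto)]
      show _ = pvVis v x y
      unfold pvVis
      conv_rhs => rw [hxa']
      rw [hrowa]
      exact (PySem.List.pyGetD_eq_getElem _ false hy (by rw [hrowlen]; omega)).symm
  · have hxa' : ¬ x = a := by omega
    rw [if_neg hxa, if_neg (by tauto)]
    have h1 : PySem.List.pyGetD v x [] = v[x.toNat]'(by omega) :=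
      PySem.List.pyGetD_eq_getElem v [] hx (by omega)
    rw [h1]

theorem pvVisRel_mark {n : Int} {v : List (List Bool)} {S : PySem.Set (Int × Int)}
    (hs : pvShape n.toNat v) (hr : pvVisRel n v S) {a b : Int}
    (ha : 0 ≤ a) (ha2 : a < n) (hb : 0 ≤ b) (hb2 : b < n) :
    pvVisRel n (pvMark v a b) (PySem.Set.add S (a, b)) := by
  intro x y hx hx2 hy hy2
  rw [pvVis_mark hs ha (by omega) hb (by omega) x y hx (by omega) hy (by omega),
    contains_add_eq, hr x y hx hx2 hy hy2]
  by_cases hxy : x = a ∧ y = b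
  · simp [hxy.1, hxy.2]
  · have : ¬ ((x, y) = (a, b)) := by
      intro h; exact hxy ⟨congrArg Prod.fst h, congrArg Prod.snd h⟩
    simp [hxy, this]

def stRelB (n ox oy : Int) (h : Nat)
    (sA : List (List Bool) × List (Int × Int) × List (Int × Int))
    (sB : PySem.Set (Int × Int) × List (Int × Int)) : Prop :=
  pvShape n.toNat sA.1 ∧ pvVisRel n sA.1 sB.1 ∧
  sA.2.1 = sB.2.drop h ∧ sA.2.2 = sB.2.map (relOf ox oy) ∧ h ≤ sB.2.length

theorem nbr_step_relB {n : Int} {board : List (List Int)} {target ox oy : Int}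
    (cx cy : Int) {h : Nat} {sA : List (List Bool) × List (Int × Int) × List (Int × Int)}
    {sB : PySem.Set (Int × Int) × List (Int × Int)} (hr : stRelB n ox oy h sA sB)
    (i : Int) (dx dy : Int)
    (hdx : PySem.List.pyGetD [1, -1, 0, 0] i 0 = dx)
    (hdy : PySem.List.pyGetD [0, 0, 1, -1] i 0 = dy) :
    stRelB n ox oy h (bfsNbrA n board target ox oy cx cy sA i)
      (nbrB n board target sB (cx + dx, cy + dy)) := by
  obtain ⟨hsh, hvr, h2, h3, h4⟩ := hr
  simp only [bfsNbrA, nbrB, hdx, hdy, cellB_eq]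
  by_cases hin : (0 ≤ cx + dx ∧ cx + dx < n) ∧ (0 ≤ cy + dy ∧ cy + dy < n)
  · rw [if_pos hin, if_pos hin]
    rw [hvr _ _ hin.1.1 hin.1.2 hin.2.1 hin.2.2]
    by_cases hv : PySem.Set.contains sB.1 (cx + dx, cy + dy) = false ∧ pvGrid board (cx + dx) (cy + dy) = target
    · rw [if_pos hv, if_pos hv]
      refine ⟨pvShape_mark hsh hin.1.1 (by omega), ?_,
        by rw [h2, List.drop_append_of_le_length h4],
        by rw [h3]; simp [relOf], by simp; omega⟩
      exact pvVisRel_mark hsh hvr hin.1.1 hin.1.2 hin.2.1 hin.2.2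
    · rw [if_neg hv, if_neg hv]
      exact ⟨hsh, hvr, h2, h3, h4⟩
  · rw [if_neg hin, if_neg hin]
    exact ⟨hsh, hvr, h2, h3, h4⟩

theorem bfs_inner_relB (n : Int) (board : List (List Int)) (target ox oy cx cy : Int)
    (h : Nat) (vis : List (List Bool)) (S : PySem.Set (Int × Int)) (q : List (Int × Int))
    (hsh : pvShape n.toNat vis) (hvr : pvVisRel n vis S) (hh : h ≤ q.length) :
    stRelB n ox oy h
      ((PySem.List.pyRange 0 4 1).foldl (bfsNbrA n board target ox oy cx cy)
        (vis, q.drop h, q.map (relOf ox oy)))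
      ([(cx + 1, cy), (cx - 1, cy), (cx, cy + 1), (cx, cy - 1)].foldl
        (nbrB n board target) (S, q)) := by
  have h4 : PySem.List.pyRange 0 4 1 = [0, 1, 2, 3] := by decide
  rw [h4]
  simp only [List.foldl]
  have base : stRelB n ox oy h (vis, q.drop h, q.map (relOf ox oy)) (S, q) :=
    ⟨hsh, hvr, rfl, rfl, hh⟩
  have s0 := nbr_step_relB (n := n) (board := board) (target := target) cx cy base 0 1 0 (by decide) (by decide)
  have s1 := nbr_step_relB (n := n) (board := board) (target := target) cx cy s0 1 (-1) 0 (by decide) (by decide)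
  have s2 := nbr_step_relB (n := n) (board := board) (target := target) cx cy s1 2 0 1 (by decide) (by decide)
  have s3 := nbr_step_relB (n := n) (board := board) (target := target) cx cy s2 3 0 (-1) (by decide) (by decide)
  simpa only [add_zero, ← sub_eq_add_neg] using s3

theorem bfs_loop_relB (n : Int) (board : List (List Int)) (target ox oy : Int) :
    ∀ (fuel : Nat) (vis : List (List Bool)) (S : PySem.Set (Int × Int))
      (q : List (Int × Int)) (h : Nat),
      pvShape n.toNat vis → pvVisRel n vis S → h ≤ q.length →
      (bfsLoopA n board target ox oy fuel vis (q.drop h) (q.map (relOf ox oy))).1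
          = (floodB n board target fuel S q h).1.map (relOf ox oy)
      ∧ pvShape n.toNat (bfsLoopA n board target ox oy fuel vis (q.drop h) (q.map (relOf ox oy))).2
      ∧ pvVisRel n (bfsLoopA n board target ox oy fuel vis (q.drop h) (q.map (relOf ox oy))).2
          (floodB n board target fuel S q h).2
  | 0, vis, S, q, h, hsh, hvr, hh => ⟨rfl, hsh, hvr⟩
  | fuel + 1, vis, S, q, h, hsh, hvr, hh => by
    by_cases hlt : h < q.length
    · have hcons : q.drop h = q[h] :: q.drop (h + 1) := (List.getElem_cons_drop _).symm
      have lhs_eq : bfsLoopA n board target ox oy (fuel + 1) vis (q[h] :: q.drop (h + 1)) (q.map (relOf ox oy))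
          = bfsLoopA n board target ox oy fuel
              ((PySem.List.pyRange 0 4 1).foldl (bfsNbrA n board target ox oy q[h].1 q[h].2)
                (vis, q.drop (h + 1), q.map (relOf ox oy))).1
              ((PySem.List.pyRange 0 4 1).foldl (bfsNbrA n board target ox oy q[h].1 q[h].2)
                (vis, q.drop (h + 1), q.map (relOf ox oy))).2.1
              ((PySem.List.pyRange 0 4 1).foldl (bfsNbrA n board target ox oy q[h].1 q[h].2)
                (vis, q.drop (h + 1), q.map (relOf ox oy))).2.2 := rfl
      have rhs_eq : floodB n board target (fuel + 1) S q h
          = floodB n board target fuel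
              ([(q[h].1 + 1, q[h].2), (q[h].1 - 1, q[h].2), (q[h].1, q[h].2 + 1), (q[h].1, q[h].2 - 1)].foldl
                (nbrB n board target) (S, q)).1
              ([(q[h].1 + 1, q[h].2), (q[h].1 - 1, q[h].2), (q[h].1, q[h].2 + 1), (q[h].1, q[h].2 - 1)].foldl
                (nbrB n board target) (S, q)).2 (h + 1) := by
        show (if h < q.length then _ else _) = _
        rw [if_pos hlt]
        rw [List.getD_eq_getElem q _ hlt]
      rw [hcons, lhs_eq, rhs_eq]
      have hin := bfs_inner_relB n board target ox oy q[h].1 q[h].2 (h + 1) vis S q hsh hvr (by omega)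
      obtain ⟨e0, e1, e2, e3, e4⟩ := hin
      rw [e2, e3]
      exact bfs_loop_relB n board target ox oy fuel _ _ _ (h + 1) e0 e1 e4
    · have hdrop : q.drop h = [] := List.drop_eq_nil_of_le (by omega)
      have lhs_eq : bfsLoopA n board target ox oy (fuel + 1) vis [] (q.map (relOf ox oy))
          = (q.map (relOf ox oy), vis) := rfl
      have rhs_eq : floodB n board target (fuel + 1) S q h = (q, S) := by
        show (if h < q.length then _ else _) = _
        rw [if_neg hlt]
      rw [hdrop, lhs_eq, rhs_eq]
      exact ⟨rfl, hsh, hvr⟩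

theorem bfsA_floodB (n : Int) (board : List (List Int)) (target i j : Int)
    (vis : List (List Bool)) (S : PySem.Set (Int × Int))
    (hsh : pvShape n.toNat vis) (hvr : pvVisRel n vis S)
    (hi : 0 ≤ i) (hi2 : i < n) (hj : 0 ≤ j) (hj2 : j < n) :
    (bfsA n board target i j vis).1
        = (floodB n board target (n.toNat * n.toNat + 1) (PySem.Set.add S (i, j)) [(i, j)] 0).1.map (relOf i j)
    ∧ pvShape n.toNat (bfsA n board target i j vis).2
    ∧ pvVisRel n (bfsA n board target i j vis).2
        (floodB n board target (n.toNat * n.toNat + 1) (PySem.Set.add S (i, j)) [(i, j)] 0).2 := by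
  have h0 : [((0 : Int), (0 : Int))] = [(i, j)].map (relOf i j) := by simp [relOf]
  have h1 : [((i : Int), (j : Int))] = List.drop 0 [(i, j)] := rfl
  unfold bfsA
  rw [h0]
  conv_lhs => rw [h1]
  exact bfs_loop_relB n board target i j (n.toNat * n.toNat + 1)
    (pvMark vis i j) (PySem.Set.add S (i, j)) [(i, j)] 0
    (pvShape_mark hsh hi (by omega))
    (pvVisRel_mark hsh hvr hi hi2 hj hj2) (by simp)

-- ===== re-indexing B's flat scan =====

theorem pyRange_self (a : Int) : PySem.List.pyRange a a 1 = [] := by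
  rw [List.eq_nil_iff_forall_not_mem]
  intro x hx
  rw [PySem.List.mem_pyRange_one] at hx
  omega

theorem pyRange_shift (a : Int) (c : Nat) :
    PySem.List.pyRange a (a + c) 1 = (PySem.List.pyRange 0 c 1).map (fun j => a + j) := by
  induction c with
  | zero =>
    have h1 : PySem.List.pyRange a (a + 0) 1 = PySem.List.pyRange a a 1 := by norm_num
    simp [h1, pyRange_self]
  | succ k ih =>
    have hk : (a : Int) ≤ a + k := by omega
    have e1 : PySem.List.pyRange a (a + (k + 1 : Nat)) 1 = PySem.List.pyRange a (a + k) 1 ++ [a + k] := by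
      have : (a + (k + 1 : Nat) : Int) = (a + k) + 1 := by push_cast; ring
      rw [this, PySem.List.pyRange_one_succ_right hk]
    have e2 : PySem.List.pyRange 0 (k + 1 : Nat) 1 = PySem.List.pyRange 0 k 1 ++ [(k : Int)] := by
      have : ((k + 1 : Nat) : Int) = (k : Int) + 1 := by push_cast; ring
      rw [this, PySem.List.pyRange_one_succ_right (by positivity)]
    rw [e1, e2, List.map_append, ih]
    simp

theorem foldl_flatten_divmod {σ : Type} (n : Int) (hn : 0 ≤ n) (f : σ → Int → Int → σ) (init : σ) :
    (PySem.List.pyRange 0 (n * n) 1).foldl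
        (fun st idx => f st (PySem.Int.floordiv idx n) (PySem.Int.mod idx n)) init
      = (PySem.List.pyRange 0 n 1).foldl (fun st i =>
          (PySem.List.pyRange 0 n 1).foldl (fun st j => f st i j) st) init := by
  rcases eq_or_lt_of_le hn with h0 | hpos
  · have : n = 0 := h0.symm
    subst this
    rfl
  · have key : ∀ m : Nat, (m : Int) ≤ n →
        (PySem.List.pyRange 0 ((m : Int) * n) 1).foldl
            (fun st idx => f st (PySem.Int.floordiv idx n) (PySem.Int.mod idx n)) init
          = (PySem.List.pyRange 0 (m : Int) 1).foldl (fun st i =>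
              (PySem.List.pyRange 0 n 1).foldl (fun st j => f st i j) st) init := by
      intro m
      induction m with
      | zero =>
        intro _
        have ez : ((0 : Nat) : Int) * n = 0 := by norm_num
        have ez2 : ((0 : Nat) : Int) = 0 := by norm_num
        rw [ez, ez2, pyRange_self]
        rfl
      | succ k ih =>
        intro hm
        have hk : (k : Int) ≤ n := by push_cast at hm ⊢; omega
        have e1 : PySem.List.pyRange 0 (((k + 1 : Nat) : Int) * n) 1
            = PySem.List.pyRange 0 ((k : Int) * n) 1 ++ PySem.List.pyRange ((k : Int) * n) ((k : Int) * n + n) 1 := by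
          have h2 : ((k + 1 : Nat) : Int) * n = (k : Int) * n + n := by push_cast; ring
          rw [h2]
          exact PySem.List.pyRange_one_append 0 ((k : Int) * n) ((k : Int) * n + n)
            (by positivity) (by omega)
        have e2 : PySem.List.pyRange ((k : Int) * n) ((k : Int) * n + n) 1
            = (PySem.List.pyRange 0 n 1).map (fun j => (k : Int) * n + j) := by
          have : n = (n.toNat : Int) := by omega
          rw [this]
          exact pyRange_shift _ _
        have e3 : PySem.List.pyRange 0 ((k + 1 : Nat) : Int) 1
            = PySem.List.pyRange 0 (k : Int) 1 ++ [(k : Int)] := by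
          have : ((k + 1 : Nat) : Int) = (k : Int) + 1 := by push_cast; ring
          rw [this, PySem.List.pyRange_one_succ_right (by positivity)]
        rw [e1, e3, List.foldl_append, List.foldl_append, ih hk, e2, List.foldl_map]
        simp only [List.foldl_cons, List.foldl_nil]
        apply PySem.List.foldl_congr_mem
        intro acc j hj
        rw [PySem.List.mem_pyRange_one] at hj
        have hdiv : PySem.Int.floordiv ((k : Int) * n + j) n = (k : Int) := by
          rw [PySem.Int.floordiv_eq_ediv_of_pos hpos]
          have e : (k : Int) * n + j = j + n * k := by ring
          rw [e, Int.add_mul_ediv_left _ _ (by omega : n ≠ 0),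
            Int.ediv_eq_zero_of_lt hj.1 hj.2]
          ring
        have hmod : PySem.Int.mod ((k : Int) * n + j) n = j := by
          rw [PySem.Int.mod_eq_emod_of_pos hpos]
          have e : (k : Int) * n + j = j + n * k := by ring
          rw [e, Int.add_mul_emod_self_left]
          exact Int.emod_eq_of_lt hj.1 hj.2
        rw [hdiv, hmod]
    have hfin := key n.toNat (by omega)
    have : ((n.toNat : Nat) : Int) = n := by omega
    rw [this] at hfin
    exact hfin

-- ===== scan lockstep =====

theorem foldl_rel_mem {α σ τ : Type} (R : σ → τ → Prop) (fA : σ → α → σ) (fB : τ → α → τ) :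
    ∀ (l : List α), (∀ s t a, a ∈ l → R s t → R (fA s a) (fB t a)) →
      ∀ (s : σ) (t : τ), R s t → R (l.foldl fA s) (l.foldl fB t)
  | [], _, s, t, h => h
  | a :: l, hstep, s, t, h =>
    foldl_rel_mem R fA fB l (fun s t b hb => hstep s t b (List.mem_cons_of_mem a hb))
      (fA s a) (fB t a) (hstep s t a List.mem_cons_self h)

theorem shapesB_nested (n : Int) (board : List (List Int)) (target : Int) (n0 : 0 ≤ n) :
    shapesB n board target
      = ((PySem.List.pyRange 0 n 1).foldl (fun st i =>
          (PySem.List.pyRange 0 n 1).foldl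
            (fun (st : PySem.Set (Int × Int) × List (List (Int × Int))) j =>
              if pvGrid board i j = target ∧ PySem.Set.contains st.1 (i, j) = false then
                ((floodB n board target (n.toNat * n.toNat + 1) (PySem.Set.add st.1 (i, j)) [(i, j)] 0).2,
                 st.2 ++ [canonB (floodB n board target (n.toNat * n.toNat + 1) (PySem.Set.add st.1 (i, j)) [(i, j)] 0).1])
              else st) st) (PySem.Set.empty, [])).2 :=
  congrArg Prod.snd (foldl_flatten_divmod n n0
    (fun st i j =>
      if pvGrid board i j = target ∧ PySem.Set.contains st.1 (i, j) = false then
        ((floodB n board target (n.toNat * n.toNat + 1) (PySem.Set.add st.1 (i, j)) [(i, j)] 0).2,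
         st.2 ++ [canonB (floodB n board target (n.toNat * n.toNat + 1) (PySem.Set.add st.1 (i, j)) [(i, j)] 0).1])
      else st)
    (PySem.Set.empty, []))

theorem contains_empty_pv (q : Int × Int) : PySem.Set.contains PySem.Set.empty q = false := by
  cases hc : PySem.Set.contains PySem.Set.empty q
  · rfl
  · have := (PySem.Set.contains_iff PySem.Set.empty q).mp hc
    simp [PySem.Set.empty] at this

theorem pvVisRel_init (n : Int) : pvVisRel n (pvFalse n.toNat) PySem.Set.empty := by
  intro x y _ _ _ _
  rw [pvVis_false, contains_empty_pv]

theorem relOf_eq_map (i j : Int) (l : List (Int × Int)) :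
    l.map (relOf i j) = l.map (fun p => (p.1 - i, p.2 - j)) := rfl

set_option maxHeartbeats 1000000 in
theorem scanBlanks_relB (n : Int) (board : List (List Int)) (n0 : 0 ≤ n) :
    ∃ comps : List (List (Int × Int)),
      scanBlanksA n board = comps.map normA ∧ shapesB n board 0 = comps.map canonB := by
  rw [shapesB_nested n board 0 n0]
  unfold scanBlanksA
  set R : (List (List Bool) × List (List (Int × Int))) →
      (PySem.Set (Int × Int) × List (List (Int × Int))) → Prop :=
    fun sA sB => pvShape n.toNat sA.1 ∧ pvVisRel n sA.1 sB.1 ∧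
      ∃ comps : List (List (Int × Int)), sA.2 = comps.map normA ∧ sB.2 = comps.map canonB with hR
  have hinner : ∀ (i : Int), 0 ≤ i → i < n → ∀ sA sB, R sA sB → ∀ (j : Int), 0 ≤ j → j < n →
      R (if pvGrid board i j = 0 ∧ pvVis sA.1 i j = false then
          ((bfsA n board 0 i j sA.1).2, sA.2 ++ [normA (bfsA n board 0 i j sA.1).1]) else sA)
        (if pvGrid board i j = 0 ∧ PySem.Set.contains sB.1 (i, j) = false then
          ((floodB n board 0 (n.toNat * n.toNat + 1) (PySem.Set.add sB.1 (i, j)) [(i, j)] 0).2,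
           sB.2 ++ [canonB (floodB n board 0 (n.toNat * n.toNat + 1) (PySem.Set.add sB.1 (i, j)) [(i, j)] 0).1]) else sB) := by
    intro i hi hi2 sA sB hr j hj hj2
    obtain ⟨hsh, hvr, comps, hA, hB⟩ := hr
    rw [hvr i j hi hi2 hj hj2]
    by_cases hc : pvGrid board i j = 0 ∧ PySem.Set.contains sB.1 (i, j) = false
    · rw [if_pos hc, if_pos hc]
      obtain ⟨e1, e2, e3⟩ := bfsA_floodB n board 0 i j sA.1 sB.1 hsh hvr hi hi2 hj hj2
      refine ⟨e2, e3, comps ++ [(floodB n board 0 (n.toNat * n.toNat + 1) (PySem.Set.add sB.1 (i, j)) [(i, j)] 0).1], ?_, ?_⟩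
      · rw [hA, e1, List.map_append, List.map_cons, List.map_nil, relOf_eq_map, normA_translate]
      · simp [hB]
    · rw [if_neg hc, if_neg hc]
      exact ⟨hsh, hvr, comps, hA, hB⟩
  have main := foldl_rel_mem R
    (fun st i =>
      (PySem.List.pyRange 0 n 1).foldl (fun (st : List (List Bool) × List (List (Int × Int))) j =>
        if pvGrid board i j = 0 ∧ pvVis st.1 i j = false then
          let r := bfsA n board 0 i j st.1
          (r.2, st.2 ++ [normA r.1])
        else st) st)
    (fun st i =>
      (PySem.List.pyRange 0 n 1).foldl
        (fun (st : PySem.Set (Int × Int) × List (List (Int × Int))) j =>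
          if pvGrid board i j = 0 ∧ PySem.Set.contains st.1 (i, j) = false then
            ((floodB n board 0 (n.toNat * n.toNat + 1) (PySem.Set.add st.1 (i, j)) [(i, j)] 0).2,
             st.2 ++ [canonB (floodB n board 0 (n.toNat * n.toNat + 1) (PySem.Set.add st.1 (i, j)) [(i, j)] 0).1])
          else st) st)
    (PySem.List.pyRange 0 n 1)
    (fun s t i hi hst =>
      foldl_rel_mem R _ _ (PySem.List.pyRange 0 n 1)
        (fun s' t' j hj hst' =>
          hinner i (PySem.List.mem_pyRange_one.mp hi).1 (PySem.List.mem_pyRange_one.mp hi).2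
            s' t' hst' j (PySem.List.mem_pyRange_one.mp hj).1 (PySem.List.mem_pyRange_one.mp hj).2)
        s t hst)
    (pvFalse n.toNat, []) (PySem.Set.empty, [])
    ⟨pvShape_false n.toNat, pvVisRel_init n, [], rfl, rfl⟩
  obtain ⟨-, -, comps, hA, hB⟩ := main
  exact ⟨comps, hA, hB⟩

set_option maxHeartbeats 1000000 in
theorem scanBlocks_relB (n : Int) (board : List (List Int)) (n0 : 0 ≤ n) :
    ∃ comps : List (List (Int × Int)),
      scanBlocksA n board = comps ∧ shapesB n board 1 = comps.map canonB := by
  rw [shapesB_nested n board 1 n0]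
  unfold scanBlocksA
  set R : (List (List Bool) × List (List (Int × Int))) →
      (PySem.Set (Int × Int) × List (List (Int × Int))) → Prop :=
    fun sA sB => pvShape n.toNat sA.1 ∧ pvVisRel n sA.1 sB.1 ∧
      ∃ comps : List (List (Int × Int)), sA.2 = comps ∧ sB.2 = comps.map canonB with hR
  have hinner : ∀ (i : Int), 0 ≤ i → i < n → ∀ sA sB, R sA sB → ∀ (j : Int), 0 ≤ j → j < n →
      R (if pvGrid board i j = 1 ∧ pvVis sA.1 i j = false then
          ((bfsA n board 1 i j sA.1).2, sA.2 ++ [(bfsA n board 1 i j sA.1).1]) else sA)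
        (if pvGrid board i j = 1 ∧ PySem.Set.contains sB.1 (i, j) = false then
          ((floodB n board 1 (n.toNat * n.toNat + 1) (PySem.Set.add sB.1 (i, j)) [(i, j)] 0).2,
           sB.2 ++ [canonB (floodB n board 1 (n.toNat * n.toNat + 1) (PySem.Set.add sB.1 (i, j)) [(i, j)] 0).1]) else sB) := by
    intro i hi hi2 sA sB hr j hj hj2
    obtain ⟨hsh, hvr, comps, hA, hB⟩ := hr
    rw [hvr i j hi hi2 hj hj2]
    by_cases hc : pvGrid board i j = 1 ∧ PySem.Set.contains sB.1 (i, j) = false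
    · rw [if_pos hc, if_pos hc]
      obtain ⟨e1, e2, e3⟩ := bfsA_floodB n board 1 i j sA.1 sB.1 hsh hvr hi hi2 hj hj2
      refine ⟨e2, e3, comps ++ [(bfsA n board 1 i j sA.1).1], ?_, ?_⟩
      · rw [hA]
      · rw [hB, List.map_append, e1, List.map_cons, List.map_nil, relOf_eq_map, canonB_translate]
    · rw [if_neg hc, if_neg hc]
      exact ⟨hsh, hvr, comps, hA, hB⟩
  have main := foldl_rel_mem R
    (fun st i =>
      (PySem.List.pyRange 0 n 1).foldl (fun (st : List (List Bool) × List (List (Int × Int))) j =>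
        if pvGrid board i j = 1 ∧ pvVis st.1 i j = false then
          let r := bfsA n board 1 i j st.1
          (r.2, st.2 ++ [r.1])
        else st) st)
    (fun st i =>
      (PySem.List.pyRange 0 n 1).foldl
        (fun (st : PySem.Set (Int × Int) × List (List (Int × Int))) j =>
          if pvGrid board i j = 1 ∧ PySem.Set.contains st.1 (i, j) = false then
            ((floodB n board 1 (n.toNat * n.toNat + 1) (PySem.Set.add st.1 (i, j)) [(i, j)] 0).2,
             st.2 ++ [canonB (floodB n board 1 (n.toNat * n.toNat + 1) (PySem.Set.add st.1 (i, j)) [(i, j)] 0).1])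
          else st) st)
    (PySem.List.pyRange 0 n 1)
    (fun s t i hi hst =>
      foldl_rel_mem R _ _ (PySem.List.pyRange 0 n 1)
        (fun s' t' j hj hst' =>
          hinner i (PySem.List.mem_pyRange_one.mp hi).1 (PySem.List.mem_pyRange_one.mp hi).2
            s' t' hst' j (PySem.List.mem_pyRange_one.mp hj).1 (PySem.List.mem_pyRange_one.mp hj).2)
        s t hst)
    (pvFalse n.toNat, []) (PySem.Set.empty, [])
    ⟨pvShape_false n.toNat, pvVisRel_init n, [], rfl, rfl⟩
  obtain ⟨-, -, comps, hA, hB⟩ := main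
  exact ⟨comps, hA, hB⟩

-- ===== the matching =====

def pvGreedy : List (List (Int × Int)) → PySem.Dict (List (Int × Int)) Int → Int
  | [], _ => 0
  | k :: ks, pool =>
    if 0 < pool.getD k 0 then (k.length : Int) + pvGreedy ks (pool.modify k 0 (fun v => v - 1))
    else pvGreedy ks pool

def cntU (key : List (Int × Int)) : List (List (Int × Int)) → List Bool → Nat
  | [], _ => 0
  | _ :: _, [] => 0
  | b :: bs, u :: us => (if canonB b = key ∧ u = false then 1 else 0) + cntU key bs us

theorem matchOneA_spec {blank : List (Int × Int)} (hb : ∃ s0, blank = normA s0) :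
    ∀ (blocks : List (List (Int × Int))) (used : List Bool), used.length = blocks.length →
      ((matchOneA blank blocks used).1.length = used.length)
      ∧ ((matchOneA blank blocks used).2 = false →
          (matchOneA blank blocks used).1 = used ∧ cntU (canonB blank) blocks used = 0)
      ∧ ((matchOneA blank blocks used).2 = true →
          cntU (canonB blank) blocks (matchOneA blank blocks used).1 + 1 = cntU (canonB blank) blocks used
          ∧ ∀ c, c ≠ canonB blank → cntU c blocks (matchOneA blank blocks used).1 = cntU c blocks used)
      ∧ ((matchOneA blank blocks used).2 = true ↔ 0 < cntU (canonB blank) blocks used) := by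
  intro blocks
  induction blocks with
  | nil =>
    intro used hlen
    have e : matchOneA blank [] used = (used, false) := rfl
    rw [e]
    exact ⟨rfl, fun _ => ⟨rfl, rfl⟩, fun h => by simp at h, by simp [cntU]⟩
  | cons b bs ih =>
    intro used hlen
    match used, hlen with
    | u :: us, hlen =>
      have hlen' : us.length = bs.length := by simpa using hlen
      have IH := ih us hlen'
      by_cases hc1 : u = true ∨ ¬ b.length = blank.length
      · have hstep : matchOneA blank (b :: bs) (u :: us) =
            (u :: (matchOneA blank bs us).1, (matchOneA blank bs us).2) := by
          rw [matchOneA, if_pos hc1]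
        have hkey0 : (if canonB b = canonB blank ∧ u = false then 1 else 0) = 0 := by
          rcases hc1 with h | h
          · simp [h]
          · have : ¬ (canonB b = canonB blank ∧ u = false) := by
              rintro ⟨hcb, -⟩
              exact h ((matchCond_iff hb).mpr hcb).1
            simp [this]
        rw [hstep]
        refine ⟨by simp [IH.1], ?_, ?_, ?_⟩
        · intro h
          obtain ⟨he, hz⟩ := IH.2.1 h
          refine ⟨by rw [he], ?_⟩
          simp only [cntU, hkey0, hz]
        · intro h
          obtain ⟨h1, h2⟩ := IH.2.2.1 h
          refine ⟨?_, ?_⟩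
          · simp only [cntU]
            omega
          · intro c hc
            have := h2 c hc
            simp only [cntU]
            omega
        · rw [IH.2.2.2]
          simp only [cntU, hkey0]
          omega
      · push_neg at hc1
        obtain ⟨hu, hlen2⟩ := hc1
        simp only [Bool.not_eq_true] at hu
        by_cases ht : rotTryA blank 4 b = true
        · have hcb : canonB b = canonB blank := (matchCond_iff hb).mp ⟨hlen2, ht⟩
          have hstep : matchOneA blank (b :: bs) (u :: us) = (true :: us, true) := by
            rw [matchOneA, if_neg (by simp [hu, hlen2]), if_pos ht]
          rw [hstep]
          refine ⟨by simp, by intro h; simp at h, ?_, ?_⟩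
          · intro _
            refine ⟨?_, ?_⟩
            · simp only [cntU, hu, hcb]
              simp
              omega
            · intro c hc
              simp only [cntU, hu]
              rw [if_neg (by rintro ⟨h', h''⟩; simp at h''),
                  if_neg (by rintro ⟨h', -⟩; exact hc (h'.symm.trans hcb))]
          · simp only [cntU, hu, hcb]
            simp
        · have hstep : matchOneA blank (b :: bs) (u :: us) =
              (u :: (matchOneA blank bs us).1, (matchOneA blank bs us).2) := by
            rw [matchOneA, if_neg (by simp [hu, hlen2]), if_neg ht]
          have hkey0 : (if canonB b = canonB blank ∧ u = false then 1 else 0) = 0 := by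
            have : ¬ (canonB b = canonB blank ∧ u = false) := by
              rintro ⟨hcb, -⟩
              exact ht ((matchCond_iff hb).mpr hcb).2
            simp [this]
          rw [hstep]
          refine ⟨by simp [IH.1], ?_, ?_, ?_⟩
          · intro h
            obtain ⟨he, hz⟩ := IH.2.1 h
            refine ⟨by rw [he], ?_⟩
            simp only [cntU, hkey0, hz]
          · intro h
            obtain ⟨h1, h2⟩ := IH.2.2.1 h
            refine ⟨?_, ?_⟩
            · simp only [cntU]
              omega
            · intro c hc
              have := h2 c hc
              simp only [cntU]
              omega
          · rw [IH.2.2.2]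
            simp only [cntU, hkey0]
            omega

theorem cntU_replicate (c : List (Int × Int)) : ∀ (blocks : List (List (Int × Int))),
    cntU c blocks (List.replicate blocks.length false) = List.count c (blocks.map canonB)
  | [] => rfl
  | b :: bs => by
    simp only [List.length_cons, List.replicate_succ, cntU, List.map_cons, List.count_cons,
      cntU_replicate c bs]
    by_cases h : canonB b = c
    · simp [h]
      try omega
    · simp [h]
      try omega

theorem Afold_eq_greedy (blocks : List (List (Int × Int))) :
    ∀ (blanks : List (List (Int × Int))) (used : List Bool)
      (pool : PySem.Dict (List (Int × Int)) Int) (ans : Int),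
      used.length = blocks.length →
      (∀ c, (cntU c blocks used : Int) = pool.getD c 0) →
      (∀ b ∈ blanks, ∃ s, b = normA s) →
      (blanks.foldl (fun (st : List Bool × Int) blank =>
          let m := matchOneA blank blocks st.1
          (m.1, if m.2 then st.2 + (blank.length : Int) else st.2)) (used, ans)).2
      = ans + pvGreedy (blanks.map canonB) pool
  | [], used, pool, ans, _, _, _ => by simp [pvGreedy]
  | blank :: blanks, used, pool, ans, hlen, hinv, hnorm => by
    have hb : ∃ s0, blank = normA s0 := hnorm blank List.mem_cons_self
    have spec := matchOneA_spec hb blocks used hlen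
    have hnorm' : ∀ b ∈ blanks, ∃ s, b = normA s :=
      fun b hbm => hnorm b (List.mem_cons_of_mem _ hbm)
    simp only [List.foldl_cons, List.map_cons, pvGreedy]
    by_cases hm : (matchOneA blank blocks used).2 = true
    · have hpos : 0 < cntU (canonB blank) blocks used := spec.2.2.2.mp hm
      have hpd : 0 < pool.getD (canonB blank) 0 := by
        rw [← hinv (canonB blank)]; exact_mod_cast hpos
      rw [if_pos hpd]
      have hinv' : ∀ c, (cntU c blocks (matchOneA blank blocks used).1 : Int)
          = (pool.modify (canonB blank) 0 (fun v => v - 1)).getD c 0 := by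
        intro c
        rw [PySem.Dict.getD_modify]
        by_cases hc : c = canonB blank
        · subst hc
          rw [if_pos rfl, ← hinv (canonB blank)]
          have := (spec.2.2.1 hm).1
          omega
        · rw [if_neg hc, ← hinv c, (spec.2.2.1 hm).2 c hc]
      have IH := Afold_eq_greedy blocks blanks (matchOneA blank blocks used).1
        (pool.modify (canonB blank) 0 (fun v => v - 1)) (ans + (blank.length : Int))
        (spec.1.trans hlen) hinv' hnorm'
      simp only [hm, if_true] at IH ⊢
      rw [IH, canonB_length]
      ring
    · have hz : cntU (canonB blank) blocks used = 0 := (spec.2.1 (by simpa using hm)).2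
      have hpd : ¬ 0 < pool.getD (canonB blank) 0 := by
        rw [← hinv (canonB blank), hz]; simp
      rw [if_neg hpd]
      have heq : (matchOneA blank blocks used).1 = used := (spec.2.1 (by simpa using hm)).1
      have IH := Afold_eq_greedy blocks blanks (matchOneA blank blocks used).1 pool ans
        (spec.1.trans hlen) (fun c => by rw [heq]; exact hinv c) hnorm'
      simp only [Bool.not_eq_true] at hm
      simp only [hm, Bool.false_eq_true, if_false] at IH ⊢
      exact IH

theorem greedy_congr : ∀ (keys : List (List (Int × Int)))
    (pool pool' : PySem.Dict (List (Int × Int)) Int),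
    (∀ k ∈ keys, pool.getD k 0 = pool'.getD k 0) →
    pvGreedy keys pool = pvGreedy keys pool'
  | [], _, _, _ => rfl
  | k :: ks, pool, pool', h => by
    simp only [pvGreedy]
    rw [h k List.mem_cons_self]
    split_ifs with hp
    · have hrec : pvGreedy ks (pool.modify k 0 (fun v => v - 1))
          = pvGreedy ks (pool'.modify k 0 (fun v => v - 1)) := by
        apply greedy_congr
        intro j hj
        rw [PySem.Dict.getD_modify, PySem.Dict.getD_modify]
        split_ifs with hjk
        · rw [h k List.mem_cons_self]
        · exact h j (List.mem_cons_of_mem _ hj)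
      rw [hrec]
    · exact greedy_congr ks _ _ (fun j hj => h j (List.mem_cons_of_mem _ hj))

theorem greedy_filter (k : List (Int × Int)) :
    ∀ (keys : List (List (Int × Int))) (pool : PySem.Dict (List (Int × Int)) Int),
      (∀ c, 0 ≤ pool.getD c 0) →
      pvGreedy keys pool
        = min ((keys.count k : Int)) (pool.getD k 0) * (k.length : Int)
          + pvGreedy (keys.filter (fun j => ¬ j = k)) pool
  | [], pool, hpool => by
    have h0 := hpool k
    simp [pvGreedy]
    omega
  | h :: ks, pool, hpool => by
    by_cases hk : h = k
    · subst hk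
      have hcnt : (h :: ks).count h = ks.count h + 1 := by simp [List.count_cons]
      have hflt : (h :: ks).filter (fun j => ¬ j = h) = ks.filter (fun j => ¬ j = h) := by
        simp [List.filter_cons]
      by_cases hp : 0 < pool.getD h 0
      · have hstep : pvGreedy (h :: ks) pool
            = (h.length : Int) + pvGreedy ks (pool.modify h 0 (fun v => v - 1)) := by
          simp only [pvGreedy, if_pos hp]
        have hpool' : ∀ c, 0 ≤ (pool.modify h 0 (fun v => v - 1)).getD c 0 := by
          intro c
          rw [PySem.Dict.getD_modify]
          split_ifs with hc
          · subst hc; omega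
          · exact hpool c
        have IH := greedy_filter h ks (pool.modify h 0 (fun v => v - 1)) hpool'
        have hmk : (pool.modify h 0 (fun v => v - 1)).getD h 0 = pool.getD h 0 - 1 := by
          rw [PySem.Dict.getD_modify, if_pos rfl]
        have hG : pvGreedy (ks.filter (fun j => ¬ j = h)) (pool.modify h 0 (fun v => v - 1))
            = pvGreedy (ks.filter (fun j => ¬ j = h)) pool := by
          apply greedy_congr
          intro j hj
          rw [PySem.Dict.getD_modify]
          have : ¬ j = h := by
            have := List.of_mem_filter hj
            simpa using this
          rw [if_neg this]
        rw [hstep, IH, hmk, hG, hflt, hcnt]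
        have hmin : min ((ks.count h + 1 : Nat) : Int) (pool.getD h 0)
            = min ((ks.count h : Nat) : Int) (pool.getD h 0 - 1) + 1 := by
          push_cast
          omega
        rw [hmin]
        ring
      · have h0 : pool.getD h 0 = 0 := by have := hpool h; omega
        have hstep : pvGreedy (h :: ks) pool = pvGreedy ks pool := by
          simp only [pvGreedy, if_neg hp]
        have IH := greedy_filter h ks pool hpool
        rw [hstep, IH, hflt, hcnt, h0]
        have : min ((ks.count h + 1 : Nat) : Int) 0 = 0 := by push_cast; omega
        have h2 : min ((ks.count h : Nat) : Int) 0 = 0 := by push_cast; omega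
        rw [this, h2]
    · have hcnt : (h :: ks).count k = ks.count k := by simp [List.count_cons, hk]
      have hne : (fun j => ¬ j = k) h = True := by simp [hk]
      have hflt : (h :: ks).filter (fun j => ¬ j = k) = h :: ks.filter (fun j => ¬ j = k) := by
        simp [List.filter_cons, hk]
      by_cases hp : 0 < pool.getD h 0
      · have hpool' : ∀ c, 0 ≤ (pool.modify h 0 (fun v => v - 1)).getD c 0 := by
          intro c
          rw [PySem.Dict.getD_modify]
          split_ifs with hc
          · subst hc; omega
          · exact hpool c
        have IH := greedy_filter k ks (pool.modify h 0 (fun v => v - 1)) hpool'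
        have hstep : pvGreedy (h :: ks) pool
            = (h.length : Int) + pvGreedy ks (pool.modify h 0 (fun v => v - 1)) := by
          simp only [pvGreedy, if_pos hp]
        have hstep2 : pvGreedy (h :: ks.filter (fun j => ¬ j = k)) pool
            = (h.length : Int) + pvGreedy (ks.filter (fun j => ¬ j = k)) (pool.modify h 0 (fun v => v - 1)) := by
          simp only [pvGreedy, if_pos hp]
        have hpk : (pool.modify h 0 (fun v => v - 1)).getD k 0 = pool.getD k 0 := by
          rw [PySem.Dict.getD_modify, if_neg (by intro hh; exact hk hh.symm)]
        rw [hstep, IH, hpk, hflt, hstep2, hcnt]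
        ring
      · have hstep : pvGreedy (h :: ks) pool = pvGreedy ks pool := by
          simp only [pvGreedy, if_neg hp]
        have hstep2 : pvGreedy (h :: ks.filter (fun j => ¬ j = k)) pool
            = pvGreedy (ks.filter (fun j => ¬ j = k)) pool := by
          simp only [pvGreedy, if_neg hp]
        rw [hstep, greedy_filter k ks pool hpool, hflt, hstep2, hcnt]

theorem greedy_eq_sum : ∀ (ds keys : List (List (Int × Int)))
    (pool : PySem.Dict (List (Int × Int)) Int),
    ds.Nodup → (∀ k ∈ keys, k ∈ ds) → (∀ c, 0 ≤ pool.getD c 0) →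
    pvGreedy keys pool
      = (ds.map (fun k => min ((keys.count k : Int)) (pool.getD k 0) * (k.length : Int))).sum
  | [], keys, pool, _, hmem, _ => by
    have : keys = [] := List.eq_nil_iff_forall_not_mem.mpr (fun x hx => by simpa using hmem x hx)
    subst this
    rfl
  | d :: ds, keys, pool, hnd, hmem, hpool => by
    rw [List.nodup_cons] at hnd
    have hstep := greedy_filter d keys pool hpool
    have IH := greedy_eq_sum ds (keys.filter (fun j => ¬ j = d)) pool hnd.2
      (fun k hk => by
        have hkk := List.of_mem_filter hk
        have hkm := List.mem_of_mem_filter hk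
        have := hmem k hkm
        simp only [decide_not, Bool.not_eq_true', decide_eq_false_iff_not] at hkk
        rcases List.mem_cons.mp this with rfl | hh
        · exact absurd rfl hkk
        · exact hh) hpool
    rw [hstep, IH, List.map_cons, List.sum_cons]
    congr 1
    have : ∀ k ∈ ds, min (((keys.filter (fun j => ¬ j = d)).count k : Int)) (pool.getD k 0) * (k.length : Int)
        = min ((keys.count k : Int)) (pool.getD k 0) * (k.length : Int) := by
      intro k hk
      have hkd : ¬ k = d := fun hh => hnd.1 (hh ▸ hk)
      have : (keys.filter (fun j => ¬ j = d)).count k = keys.count k :=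
        List.count_filter (by simpa using hkd)
      rw [this]
    rw [List.map_congr_left this]

theorem solution_eq_alt (game_board table : List (List Int)) :
    solution game_board table = solution_alt game_board table := by
  have n0 : (0 : Int) ≤ (game_board.length : Int) := by positivity
  obtain ⟨compsB, hA1, hB1⟩ := scanBlanks_relB (game_board.length : Int) game_board n0
  obtain ⟨compsT, hA2, hB2⟩ := scanBlocks_relB (game_board.length : Int) table n0
  simp only [solution, solution_alt]
  have hkeysT : (scanBlocksA (game_board.length : Int) table).map canonB
      = shapesB (game_board.length : Int) table 1 := by
    rw [hA2, hB2]
  have hinv : ∀ c, (cntU c (scanBlocksA (game_board.length : Int) table)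
        (List.replicate (scanBlocksA (game_board.length : Int) table).length false) : Int)
      = (PySem.Dict.counter (shapesB (game_board.length : Int) table 1)).getD c 0 := by
    intro c
    rw [cntU_replicate, PySem.Dict.getD_counter, hkeysT]
  have hAside := Afold_eq_greedy (scanBlocksA (game_board.length : Int) table)
    (scanBlanksA (game_board.length : Int) game_board)
    (List.replicate (scanBlocksA (game_board.length : Int) table).length false)
    (PySem.Dict.counter (shapesB (game_board.length : Int) table 1)) 0 (by simp) hinv
    (fun b hb => by
      rw [hA1] at hb
      obtain ⟨sx, -, rfl⟩ := List.mem_map.mp hb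
      exact ⟨sx, rfl⟩)
  rw [hAside]
  have hkeysB : (scanBlanksA (game_board.length : Int) game_board).map canonB
      = shapesB (game_board.length : Int) game_board 0 := by
    rw [hA1, hB1, List.map_map]
    exact List.map_congr_left (fun c _ => canonB_normA c)
  rw [hkeysB]
  rw [PySem.Dict.items_counter, List.foldl_map, PySem.List.foldl_add]
  have hpn : ∀ c, 0 ≤ (PySem.Dict.counter (shapesB (game_board.length : Int) table 1)).getD c 0 := by
    intro c
    rw [PySem.Dict.getD_counter]
    positivity
  rw [greedy_eq_sum (PySem.Set.ofList (shapesB (game_board.length : Int) game_board 0))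
    (shapesB (game_board.length : Int) game_board 0)
    (PySem.Dict.counter (shapesB (game_board.length : Int) table 1))
    (PySem.Set.nodup_ofList _)
    (fun k hk => (PySem.Set.mem_ofList _ k).mpr hk) hpn]

-- ===== VERDICT (by name: the statement is the Claim_ definition above) =====
theorem solution_spec : Claim_equal_solution := by
  intro game_board table _ _
  show _ = _
  exact solution_eq_alt game_board table
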